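-- pv_equiv track=rewrite | github.com/Axelvazslima/practices-python | exercises_solutions/arrays/insert_ordened_first_same_order.py | idosos_inicio
-- ===== SOURCE A (Python) =====
-- def idosos_inicio(passengers):
--     position = 0
--     for i in range(len(passengers)):
--         if passengers[i] >= 60:
--             for j in range(i, position, -1):
--                 passengers[j], passengers[j - 1] = passengers[j - 1], passengers[j]
--             position += 1
--     else: return passengers
-- ===== SOURCE B (Python) =====
-- def idosos_inicio(passengers):
--     elderly = []
--     young = []
--     for p in passengers:
--         if p >= 60:
--             elderly.append(p)
--         else:
--             young.append(p)
--     passengers[:] = elderly + young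
--     return passengers
-- ===== Notes on version B (the rewrite author's own statement) =====
-- stated objective: faster
-- what changed: Replaces the quadratic in-place adjacent-swap rotation loop by a single pass that collects elderly and young into two lists in order and concatenates them (written back in place, preserving A's mutation of the argument).
import Mathlib
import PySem

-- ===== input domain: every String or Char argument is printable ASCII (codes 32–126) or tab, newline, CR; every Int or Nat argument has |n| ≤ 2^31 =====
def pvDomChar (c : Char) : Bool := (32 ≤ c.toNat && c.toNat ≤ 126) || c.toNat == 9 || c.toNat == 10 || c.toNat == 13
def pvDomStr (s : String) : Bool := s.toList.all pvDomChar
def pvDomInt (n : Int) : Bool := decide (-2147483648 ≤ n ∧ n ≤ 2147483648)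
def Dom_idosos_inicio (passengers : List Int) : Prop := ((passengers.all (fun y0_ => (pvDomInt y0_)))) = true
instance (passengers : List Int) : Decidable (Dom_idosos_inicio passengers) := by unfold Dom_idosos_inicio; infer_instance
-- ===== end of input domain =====

-- B replaces A's quadratic in-place adjacent-swap rotation by a one-pass split into elderly/young plus
-- concatenation (objective: faster). Both Pythons mutate the argument list to the returned value;
-- the equivalence proved here is about the RETURN value.

-- ===== PORT A =====
-- passengers[j], passengers[j-1] = passengers[j-1], passengers[j]
-- (both reads from the pre-statement list, then assignment to j, then to j-1)
def pvSwap (ys : List Int) (j : Int) : List Int :=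
  PySem.List.pySetD (PySem.List.pySetD ys j (PySem.List.pyGetD ys (j - 1) 0)) (j - 1)
    (PySem.List.pyGetD ys j 0)

def idosos_inicio (passengers : List Int) : List Int :=
  ((PySem.List.pyRange 0 (PySem.List.len passengers) 1).foldl
    (fun (st : List Int × Int) i =>
      if 60 ≤ PySem.List.pyGetD st.1 i 0 then
        ((PySem.List.pyRange i st.2 (-1)).foldl pvSwap st.1, st.2 + 1)
      else st)
    (passengers, 0)).1

-- ===== PORT B =====
def idosos_inicio_alt (passengers : List Int) : List Int :=
  let st := passengers.foldl
    (fun (st : List Int × List Int) p =>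
      if 60 ≤ p then (st.1 ++ [p], st.2) else (st.1, st.2 ++ [p]))
    ([], [])
  st.1 ++ st.2

-- ===== PRECONDITION & SPEC =====
def Spec_idosos_inicio (passengers : List Int) (out : List Int) : Prop := out = idosos_inicio_alt passengers
instance (passengers : List Int) (out : List Int) : Decidable (Spec_idosos_inicio passengers out) := by unfold Spec_idosos_inicio; infer_instance

-- ===== CLAIM (what is proved, stated in full; the proofs are below) =====
def Claim_equal_idosos_inicio : Prop := ∀ (passengers : List Int), Dom_idosos_inicio passengers → Spec_idosos_inicio passengers (idosos_inicio passengers)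

-- ===== LEMMAS AND PROOFS =====

-- One swap at index |P|+1 exchanges the two elements following the prefix P.
theorem pvSwap_concrete (P : List Int) (a b : Int) (rest : List Int) :
    pvSwap (P ++ a :: b :: rest) ((P.length : Int) + 1) = P ++ b :: a :: rest := by
  have h1 : (P.length : Int) + 1 = ((P.length + 1 : Nat) : Int) := by omega
  have h2 : (P.length : Int) + 1 - 1 = ((P.length : Nat) : Int) := by omega
  rw [pvSwap, h2, h1]
  simp only [PySem.List.pyGetD_natCast, PySem.List.pySetD_natCast]
  simp

-- The inner countdown of adjacent swaps rotates x from position |E|+|Y| to position |E|.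
theorem pvRot (E : List Int) (Y : List Int) (x : Int) (rest : List Int) :
    (PySem.List.pyRange ((E.length : Int) + (Y.length : Int)) ((E.length : Int)) (-1)).foldl pvSwap
      (E ++ Y ++ x :: rest) = E ++ x :: (Y ++ rest) := by
  induction Y using List.reverseRecOn generalizing rest with
  | nil =>
    rw [PySem.List.pyRange_neg_one_eq_nil (by simp)]
    simp
  | append_singleton Y' y ih =>
    have hlen : (E.length : Int) + ((Y' ++ [y]).length : Int) = ((E ++ Y').length : Int) + 1 := by
      simp; ring
    rw [hlen, PySem.List.pyRange_neg_one_cons (by simp)]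
    rw [List.foldl_cons]
    have e1 : E ++ (Y' ++ [y]) ++ x :: rest = (E ++ Y') ++ y :: x :: rest := by simp
    rw [e1, pvSwap_concrete]
    have e2 : ((E ++ Y').length : Int) + 1 - 1 = (E.length : Int) + (Y'.length : Int) := by
      simp
    have e3 : (E ++ Y') ++ x :: y :: rest = E ++ Y' ++ x :: (y :: rest) := by simp
    rw [e2, e3, ih]
    simp

theorem filter_split_len (l : List Int) :
    (l.filter (fun p => decide (60 ≤ p))).length + (l.filter (fun p => decide (p < 60))).length
      = l.length := by
  induction l with
  | nil => rfl
  | cons x l ih =>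
    by_cases hx : (60:Int) ≤ x
    · have := ih; simp [hx, show ¬ x < 60 from by omega]; omega
    · have := ih; simp [hx, show x < 60 from by omega]; omega

theorem getD_append_cons (A : List Int) (b : Int) (r : List Int) :
    (A ++ b :: r).getD A.length 0 = b := by simp

-- Invariant of A's outer loop after the first k indices: the prefix is stably partitioned,
-- the suffix is untouched, and position counts the elderly seen so far.
theorem outer_inv (passengers : List Int) (k : Nat) (hk : k ≤ passengers.length) :
    (PySem.List.pyRange 0 (k : Int) 1).foldl
      (fun (st : List Int × Int) i =>
        if 60 ≤ PySem.List.pyGetD st.1 i 0 then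
          ((PySem.List.pyRange i st.2 (-1)).foldl pvSwap st.1, st.2 + 1)
        else st)
      (passengers, 0)
    = ((passengers.take k).filter (fun p => 60 ≤ p) ++ (passengers.take k).filter (fun p => ¬ 60 ≤ p)
        ++ passengers.drop k,
       (((passengers.take k).countP (fun p => 60 ≤ p) : Nat) : Int)) := by
  induction k with
  | zero => simp
  | succ k ih =>
    have hk' : k ≤ passengers.length := Nat.le_of_succ_le hk
    have hklt : k < passengers.length := hk
    have hr : PySem.List.pyRange 0 ((k + 1 : Nat) : Int) 1
        = PySem.List.pyRange 0 (k : Int) 1 ++ [(k : Int)] := by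
      push_cast
      exact PySem.List.pyRange_one_succ_right (by positivity)
    rw [hr, List.foldl_append, ih hk', List.foldl_cons, List.foldl_nil]
    set E := (passengers.take k).filter (fun p => 60 ≤ p) with hE
    set Y := (passengers.take k).filter (fun p => ¬ 60 ≤ p) with hY
    have hlenEY : E.length + Y.length = k := by
      rw [hE, hY]
      have h := filter_split_len (passengers.take k)
      simpa [List.length_take, Nat.min_eq_left hk'] using h
    have hlen2 : (E ++ Y).length = k := by simp [hlenEY]
    have hdrop : passengers.drop k = passengers[k] :: passengers.drop (k + 1) :=
      (List.getElem_cons_drop hklt).symm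
    have hget : PySem.List.pyGetD (E ++ Y ++ passengers.drop k) (k : Int) 0 = passengers[k] := by
      rw [PySem.List.pyGetD_natCast, hdrop]
      generalize List.drop (k + 1) passengers = r
      generalize passengers[k] = b
      rw [← hlen2]
      exact getD_append_cons (E ++ Y) _ _
    have htake : passengers.take (k + 1) = passengers.take k ++ [passengers[k]] := by
      rw [List.take_add_one]
      simp [List.getElem?_eq_getElem hklt]
    have hcountE : (passengers.take k).countP (fun p => decide (60 ≤ p)) = E.length := by
      rw [hE, ← List.countP_eq_length_filter]
    have hcnt : (((passengers.take k).countP (fun p => 60 ≤ p) : Nat) : Int) = (E.length : Int) :=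
      congrArg (Nat.cast : Nat → Int) hcountE
    have hidx : (k : Int) = (E.length : Int) + (Y.length : Int) := by
      push_cast [← hlenEY]; ring
    by_cases hp : 60 ≤ passengers[k]
    · rw [if_pos (by rw [hget]; exact hp)]
      rw [hcnt, hdrop]
      conv_lhs => rw [hidx]
      rw [pvRot]
      simp only [Prod.mk.injEq]
      refine ⟨?_, ?_⟩
      · rw [htake, List.filter_append, List.filter_append, ← hE, ← hY]
        simp [hp]
      · rw [htake]
        simp only [List.countP_append]
        simp [hp, hcountE]
    · rw [if_neg (by rw [hget]; exact hp)]
      simp only [Prod.mk.injEq]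
      refine ⟨?_, ?_⟩
      · rw [htake, hdrop, List.filter_append, List.filter_append, ← hE, ← hY]
        simp [hp]
        rw [hdrop]
        simp [show passengers[k] < 60 from by omega]
      · rw [htake]
        simp only [List.countP_append]
        simp [hp, hcountE]

-- B's fold computes the two filters.
theorem alt_acc (xs : List Int) (E Y : List Int) :
    xs.foldl (fun (st : List Int × List Int) p =>
      if 60 ≤ p then (st.1 ++ [p], st.2) else (st.1, st.2 ++ [p])) (E, Y)
    = (E ++ xs.filter (fun p => 60 ≤ p), Y ++ xs.filter (fun p => ¬ 60 ≤ p)) := by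
  induction xs generalizing E Y with
  | nil => simp
  | cons x xs ih =>
    by_cases hx : 60 ≤ x <;> simp [hx, ih, List.filter_cons]

theorem alt_eq (passengers : List Int) :
    idosos_inicio_alt passengers =
      passengers.filter (fun p => 60 ≤ p) ++ passengers.filter (fun p => ¬ 60 ≤ p) := by
  simp [idosos_inicio_alt, alt_acc]

-- ===== VERDICT (by name: the statement is the Claim_ definition above) =====
theorem idosos_inicio_spec : Claim_equal_idosos_inicio := by
  intro passengers _
  unfold Spec_idosos_inicio
  have h := outer_inv passengers passengers.length le_rfl
  simp only [idosos_inicio, PySem.List.len_eq, h, List.take_length, List.drop_length,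
    List.append_nil, alt_eq]
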